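-- pv_equiv track=rewrite | github.com/ZoaGrad/mythotech-spiralos | scripts/plot_telemetry.py | group_by_hour
-- ===== SOURCE A (Python) =====
-- def group_by_hour(events):
--     """Group events by hour for time-series analysis."""
--     hourly = {}
--     for event in events:
--         created = event.get("created_at", "")
--         if created:
--             hour_key = created[:13]  # YYYY-MM-DDTHH
--             if hour_key not in hourly:
--                 hourly[hour_key] = []
--             hourly[hour_key].append(event)
--     return hourly
-- ===== SOURCE B (Python) =====
-- def group_by_hour(events):
--     """Group events by hour for time-series analysis."""
--     keyed = [(e.get("created_at", "")[:13], e) for e in events if e.get("created_at", "")]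
--     order = dict.fromkeys(k for k, _ in keyed)
--     return {k: [e for kk, e in keyed if kk == k] for k in order}
-- ===== Notes on version B (the rewrite author's own statement) =====
-- stated objective: alternative
-- what changed: Replaces A's single-pass incremental dict accumulation with a two-pass strategy: build a keyed (hour-prefix, event) list once, dedup the keys in first-occurrence order, then collect each group by a filter pass per key.
import Mathlib
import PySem

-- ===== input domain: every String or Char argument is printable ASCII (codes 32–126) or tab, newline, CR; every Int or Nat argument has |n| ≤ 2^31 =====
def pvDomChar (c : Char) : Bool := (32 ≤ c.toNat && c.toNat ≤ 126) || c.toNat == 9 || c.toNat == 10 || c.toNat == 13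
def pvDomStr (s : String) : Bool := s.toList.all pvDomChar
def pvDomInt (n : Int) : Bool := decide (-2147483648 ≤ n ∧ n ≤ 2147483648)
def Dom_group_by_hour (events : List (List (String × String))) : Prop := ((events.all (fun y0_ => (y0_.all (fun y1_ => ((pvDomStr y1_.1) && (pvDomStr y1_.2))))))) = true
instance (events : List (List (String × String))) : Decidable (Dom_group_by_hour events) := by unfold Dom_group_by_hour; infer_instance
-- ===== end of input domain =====

-- B groups in two passes (filter+key once, then dedup keys and collect each group) instead of A's incremental dict accumulation; objective: alternative.


-- ===== PORT A =====
def group_by_hour (events : List (List (String × String))) : List (String × List (List (String × String))) :=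
  (events.foldl (fun (hourly : PySem.Dict String (List (List (String × String)))) event =>
      let created := (PySem.Dict.mk event).getD "created_at" ""
      if created ≠ "" then
        let hour_key := PySem.Str.slice created none (some 13)
        let h1 := if hourly.contains hour_key then hourly else hourly.insert hour_key []
        h1.modify hour_key [] (fun l => l ++ [event])
      else hourly) PySem.Dict.empty).items

-- ===== PORT B =====
def group_by_hour_alt (events : List (List (String × String))) : List (String × List (List (String × String))) :=
  let keyed := events.filterMap (fun e =>
    let c := (PySem.Dict.mk e).getD "created_at" ""
    if c ≠ "" then some (PySem.Str.slice c none (some 13), e) else none)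
  (PySem.List.dedup (keyed.map (·.1))).map (fun k => (k, (keyed.filter (fun p => p.1 == k)).map (·.2)))

-- ===== PRECONDITION & SPEC =====
def Spec_group_by_hour (events : List (List (String × String))) (out : List (String × List (List (String × String)))) : Prop := out = group_by_hour_alt events
instance (events : List (List (String × String))) (out : List (String × List (List (String × String)))) : Decidable (Spec_group_by_hour events out) := by unfold Spec_group_by_hour; infer_instance

-- ===== CLAIM (what is proved, stated in full; the proofs are below) =====
def Claim_equal_group_by_hour : Prop := ∀ (events : List (List (String × String))), Dom_group_by_hour events → Spec_group_by_hour events (group_by_hour events)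

-- ===== LEMMAS AND PROOFS =====

-- inserting an empty list before modifying with default [] is the same as modifying directly
theorem pv_insert_modify (d : PySem.Dict String (List (List (String × String)))) (k : String)
    (f : List (List (String × String)) → List (List (String × String))) :
    (if d.contains k then d else d.insert k []).modify k [] f = d.modify k [] f := by
  by_cases h : d.contains k = true
  · simp [h]
  · have h' : d.contains k = false := by simpa using h
    rw [if_neg (by simp [h'])]
    unfold PySem.Dict.modify
    rw [PySem.Dict.getD_insert_self, PySem.Dict.insert_insert_self,
      PySem.Dict.getD_of_not_contains d _ h']

-- the items of a grouping fold over keyed pairs are B's dedup-and-collect result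
theorem pv_items_eq (keyed : List (String × List (String × String))) :
    (keyed.foldl (fun d p => d.modify p.1 [] (fun l => l ++ [p.2])) PySem.Dict.empty).items
    = (PySem.List.dedup (keyed.map (·.1))).map
        (fun k => (k, (keyed.filter (fun p => p.1 == k)).map (·.2))) := by
  have hnd := PySem.Dict.nodup_keys_foldl_modify_key (l := keyed) (key := Prod.fst)
    (d0 := ([] : List (List (String × String)))) (f := fun _ p => fun l => l ++ [p.2])
    (d := PySem.Dict.empty) (by simp)
  rw [PySem.Dict.items_eq_map_keys _ hnd []]
  rw [PySem.Dict.keys_foldl_modify_key]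
  simp [PySem.Dict.getD_foldl_modify_append]
  rw [PySem.Set.update_nil_left]

-- A's fold over events is the modify-fold over the keyed list
theorem pv_fold_eq (events : List (List (String × String)))
    (d : PySem.Dict String (List (List (String × String)))) :
    events.foldl (fun hourly event =>
      let created := (PySem.Dict.mk event).getD "created_at" ""
      if created ≠ "" then
        let hour_key := PySem.Str.slice created none (some 13)
        let h1 := if hourly.contains hour_key then hourly else hourly.insert hour_key []
        h1.modify hour_key [] (fun l => l ++ [event])
      else hourly) d
    = (events.filterMap (fun e =>
        let c := (PySem.Dict.mk e).getD "created_at" ""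
        if c ≠ "" then some (PySem.Str.slice c none (some 13), e) else none)).foldl
        (fun d p => d.modify p.1 [] (fun l => l ++ [p.2])) d := by
  induction events generalizing d with
  | nil => rfl
  | cons e es ih =>
    by_cases hc : (PySem.Dict.mk e).getD "created_at" "" = ""
    · simp only [List.foldl_cons, List.filterMap_cons, hc, ne_eq, not_true_eq_false, if_false]
      exact ih d
    · simp only [List.foldl_cons, List.filterMap_cons, ne_eq, hc, not_false_eq_true, if_true]
      rw [pv_insert_modify]
      exact ih _

-- ===== VERDICT (by name: the statement is the Claim_ definition above) =====
theorem group_by_hour_spec : Claim_equal_group_by_hour := by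
  intro events _
  unfold Spec_group_by_hour group_by_hour group_by_hour_alt
  rw [pv_fold_eq, pv_items_eq]
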